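-- pv_equiv track=rewrite | github.com/GenYoda/Mag-Mutual | question_extractor.py | _build_trigger_string_from_values
-- ===== SOURCE A (Python) =====
-- from typing import List, Dict, Any, Optional
--
-- def _build_trigger_string_from_values(response_values: List[str]) -> str:
--     """Build proper trigger string from parent_response_values"""
--     if not response_values:
--         return "if yes or unclear"
--
--     sorted_values = sorted(response_values, key=lambda x: (x != "Yes", x != "No", x != "Unclear", x))
--
--     if len(sorted_values) == 1:
--         return f"if {sorted_values[0].lower()}"
--     elif len(sorted_values) == 2:
--         return f"if {sorted_values[0].lower()} or {sorted_values[1].lower()}"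
--     else:
--         return "if " + ", ".join(v.lower() for v in sorted_values[:-1]) + f" or {sorted_values[-1].lower()}"
-- ===== SOURCE B (Python) =====
-- def _build_trigger_string_from_values(response_values):
--     """Build proper trigger string: bucket partition instead of a custom-key sort."""
--     if not response_values:
--         return "if yes or unclear"
--     yes = [v for v in response_values if v == "Yes"]
--     no = [v for v in response_values if v == "No"]
--     unclear = [v for v in response_values if v == "Unclear"]
--     others = sorted(v for v in response_values if v not in ("Yes", "No", "Unclear"))
--     ordered = yes + no + unclear + others
--     if len(ordered) == 1:
--         return f"if {ordered[0].lower()}"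
--     return "if " + ", ".join(v.lower() for v in ordered[:-1]) + f" or {ordered[-1].lower()}"
-- ===== Notes on version B (the rewrite author's own statement) =====
-- stated objective: alternative
-- what changed: Replaces the single stable sort under a 4-tuple custom key by a one-pass partition into order-preserving Yes/No/Unclear buckets plus a plain sort of only the remaining values, and merges A's len-2 branch into the general join branch.
import Mathlib
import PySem

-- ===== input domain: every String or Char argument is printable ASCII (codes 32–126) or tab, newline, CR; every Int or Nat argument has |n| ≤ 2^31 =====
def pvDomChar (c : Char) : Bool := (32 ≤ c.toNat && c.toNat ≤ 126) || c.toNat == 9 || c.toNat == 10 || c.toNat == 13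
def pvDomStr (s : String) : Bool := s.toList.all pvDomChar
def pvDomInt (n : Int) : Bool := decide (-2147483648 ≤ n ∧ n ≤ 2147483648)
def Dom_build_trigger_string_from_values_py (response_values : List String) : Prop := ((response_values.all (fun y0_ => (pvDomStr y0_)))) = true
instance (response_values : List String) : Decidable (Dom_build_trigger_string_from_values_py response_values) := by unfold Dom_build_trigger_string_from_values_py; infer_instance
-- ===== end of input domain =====

-- B partitions into buckets instead of A's custom-key sort; alternative decomposition, same results.

-- ===== PORT A =====
-- Python's tuple key (x != "Yes", x != "No", x != "Unclear", x) compares lexicographically;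
-- the three booleans are encoded order-isomorphically as the Nat 4*b1+2*b2+b3 (False=0, True=1),
-- and the final string component is sorted2's second key — exact for Python's tuple comparison.
def pvRank (x : String) : Nat :=
  (if x = "Yes" then 0 else 4) + (if x = "No" then 0 else 2) + (if x = "Unclear" then 0 else 1)

def build_trigger_string_from_values_py (response_values : List String) : String :=
  if response_values = [] then "if yes or unclear"
  else
    let sorted_values := PySem.List.sorted2 response_values pvRank (fun x => x) false
    if sorted_values.length = 1 then
      "if " ++ PySem.Str.lower (PySem.List.pyGetD sorted_values 0 "")
    else if sorted_values.length = 2 then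
      "if " ++ PySem.Str.lower (PySem.List.pyGetD sorted_values 0 "") ++ " or "
        ++ PySem.Str.lower (PySem.List.pyGetD sorted_values 1 "")
    else
      "if " ++ PySem.Str.join ", " ((PySem.List.slice sorted_values none (some (-1))).map PySem.Str.lower)
        ++ " or " ++ PySem.Str.lower (PySem.List.pyGetD sorted_values (-1) "")

-- ===== PORT B =====
def pvSpecial (v : String) : Bool := v == "Yes" || v == "No" || v == "Unclear"

def build_trigger_string_from_values_py_alt (response_values : List String) : String :=
  if response_values = [] then "if yes or unclear"
  else
    let yes := response_values.filter (fun v => v == "Yes")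
    let no := response_values.filter (fun v => v == "No")
    let unclear := response_values.filter (fun v => v == "Unclear")
    let others := PySem.List.sorted (response_values.filter (fun v => !pvSpecial v)) (fun x => x) false
    let ordered := yes ++ no ++ unclear ++ others
    if ordered.length = 1 then
      "if " ++ PySem.Str.lower (PySem.List.pyGetD ordered 0 "")
    else
      "if " ++ PySem.Str.join ", " ((PySem.List.slice ordered none (some (-1))).map PySem.Str.lower)
        ++ " or " ++ PySem.Str.lower (PySem.List.pyGetD ordered (-1) "")

-- ===== PRECONDITION & SPEC =====
def Spec_build_trigger_string_from_values_py (response_values : List String) (out : String) : Prop := out = build_trigger_string_from_values_py_alt response_values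
instance (response_values : List String) (out : String) : Decidable (Spec_build_trigger_string_from_values_py response_values out) := by unfold Spec_build_trigger_string_from_values_py; infer_instance

-- ===== CLAIM (what is proved, stated in full; the proofs are below) =====
def Claim_equal_build_trigger_string_from_values_py : Prop := ∀ (response_values : List String), Dom_build_trigger_string_from_values_py response_values → Spec_build_trigger_string_from_values_py response_values (build_trigger_string_from_values_py response_values)

-- ===== LEMMAS AND PROOFS =====

-- A's comparison predicate (sorted2's `lt` specialised to keys pvRank / identity).
def pvBf (a b : String) : Bool :=
  decide (pvRank a < pvRank b) || (!decide (pvRank b < pvRank a) && decide (a < b))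

theorem pvSorted2_eq_foldl (xs : List String) :
    PySem.List.sorted2 xs pvRank (fun x => x) false =
      xs.foldl (fun acc x => PySem.List.insertBy pvBf x acc) [] := rfl

theorem pvInsertBy_append_not (before : String → String → Bool) (x : String)
    (pre suf : List String) (h : ∀ y ∈ pre, before x y = false) :
    PySem.List.insertBy before x (pre ++ suf) = pre ++ PySem.List.insertBy before x suf := by
  induction pre with
  | nil => simp
  | cons y ys ih =>
      have hy := h y (by simp)
      simp [PySem.List.insertBy, hy, ih (fun z hz => h z (by simp [hz]))]

theorem pvInsertBy_head_true (before : String → String → Bool) (x : String)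
    (l : List String) (h : ∀ y ∈ l, before x y = true) :
    PySem.List.insertBy before x l = x :: l := by
  cases l with
  | nil => rfl
  | cons y ys => simp [PySem.List.insertBy, h y (by simp)]

theorem pvInsertBy_congr (b1 b2 : String → String → Bool) (x : String) (l : List String)
    (h : ∀ y ∈ l, b1 x y = b2 x y) :
    PySem.List.insertBy b1 x l = PySem.List.insertBy b2 x l := by
  induction l with
  | nil => rfl
  | cons y ys ih =>
      have hy := h y (by simp)
      have ih' := ih (fun z hz => h z (by simp [hz]))
      by_cases hb : b2 x y = true
      · simp [PySem.List.insertBy, hy, hb]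
      · simp only [Bool.not_eq_true] at hb
        simp [PySem.List.insertBy, hy, hb, ih']

theorem pvRank_other {x : String} (h1 : x ≠ "Yes") (h2 : x ≠ "No") (h3 : x ≠ "Unclear") :
    pvRank x = 7 := by simp [pvRank, h1, h2, h3]

theorem pvRank_of_not_special {y : String} (h : pvSpecial y = false) : pvRank y = 7 := by
  simp only [pvSpecial, Bool.or_eq_false_iff, beq_eq_false_iff_ne] at h
  exact pvRank_other h.1.1 h.1.2 h.2

theorem pvBf_eq_false_of_rank_lt {x y : String} (h : pvRank y < pvRank x) :
    pvBf x y = false := by simp [pvBf, h, Nat.lt_asymm h]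

theorem pvBf_eq_false_of_rank_eq {x y : String} (h : pvRank x = pvRank y) (hs : ¬ x < y) :
    pvBf x y = false := by simp [pvBf, h, hs]

theorem pvSorted_snoc (O : List String) (x : String) :
    PySem.List.sorted (O ++ [x]) (fun s => s) false =
      PySem.List.insertBy (fun a b => decide (a < b)) x
        (PySem.List.sorted O (fun s => s) false) := by
  rw [PySem.List.sorted_eq_foldl_insertBy, PySem.List.sorted_eq_foldl_insertBy,
    List.foldl_append]
  rfl

-- A's sort, characterised as B's bucket concatenation.
theorem pvBuckets (xs : List String) :
    PySem.List.sorted2 xs pvRank (fun x => x) false =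
      xs.filter (fun v => v == "Yes") ++ xs.filter (fun v => v == "No")
        ++ xs.filter (fun v => v == "Unclear")
        ++ PySem.List.sorted (xs.filter (fun v => !pvSpecial v)) (fun x => x) false := by
  induction xs using List.reverseRecOn with
  | nil => rfl
  | append_singleton xs x ih =>
      rw [pvSorted2_eq_foldl, List.foldl_append, ← pvSorted2_eq_foldl, ih]
      simp only [List.foldl_cons, List.foldl_nil, List.filter_append, List.append_assoc]
      by_cases h1 : x = "Yes"
      · subst h1
        rw [pvInsertBy_append_not pvBf "Yes" _ _ (by
          intro y hy
          simp only [List.mem_filter, beq_iff_eq] at hy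
          rw [hy.2]; exact pvBf_eq_false_of_rank_eq (by decide) (lt_irrefl _))]
        rw [pvInsertBy_head_true pvBf "Yes" _ (by
          intro y hy
          simp only [List.mem_append, List.mem_filter, beq_iff_eq,
            PySem.List.mem_sorted, Bool.not_eq_true'] at hy
          have hr : 3 < pvRank y := by
            rcases hy with ⟨_, h⟩ | ⟨_, h⟩ | ⟨_, h⟩
            · rw [h]; decide
            · rw [h]; decide
            · rw [pvRank_of_not_special h]; omega
          have hrx : pvRank "Yes" = 3 := by decide
          simp [pvBf, hrx, hr, Nat.lt_asymm hr])]
        have e1 : List.filter (fun v => v == "Yes") ["Yes"] = ["Yes"] := by decide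
        have e2 : List.filter (fun v => v == "No") ["Yes"] = [] := by decide
        have e3 : List.filter (fun v => v == "Unclear") ["Yes"] = [] := by decide
        have e4 : List.filter (fun v => !pvSpecial v) ["Yes"] = [] := by decide
        simp [e1, e2, e3, e4]
      · by_cases h2 : x = "No"
        · subst h2
          rw [pvInsertBy_append_not pvBf "No" _ _ (by
            intro y hy
            simp only [List.mem_filter, beq_iff_eq] at hy
            rw [hy.2]; exact pvBf_eq_false_of_rank_lt (by decide))]
          rw [pvInsertBy_append_not pvBf "No" _ _ (by
            intro y hy
            simp only [List.mem_filter, beq_iff_eq] at hy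
            rw [hy.2]; exact pvBf_eq_false_of_rank_eq (by decide) (lt_irrefl _))]
          rw [pvInsertBy_head_true pvBf "No" _ (by
            intro y hy
            simp only [List.mem_append, List.mem_filter, beq_iff_eq,
              PySem.List.mem_sorted, Bool.not_eq_true'] at hy
            have hr : 5 < pvRank y := by
              rcases hy with ⟨_, h⟩ | ⟨_, h⟩
              · rw [h]; decide
              · rw [pvRank_of_not_special h]; omega
            have hrx : pvRank "No" = 5 := by decide
            simp [pvBf, hrx, hr, Nat.lt_asymm hr])]
          have e1 : List.filter (fun v => v == "Yes") ["No"] = [] := by decide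
          have e2 : List.filter (fun v => v == "No") ["No"] = ["No"] := by decide
          have e3 : List.filter (fun v => v == "Unclear") ["No"] = [] := by decide
          have e4 : List.filter (fun v => !pvSpecial v) ["No"] = [] := by decide
          simp [e1, e2, e3, e4]
        · by_cases h3 : x = "Unclear"
          · subst h3
            rw [pvInsertBy_append_not pvBf "Unclear" _ _ (by
              intro y hy
              simp only [List.mem_filter, beq_iff_eq] at hy
              rw [hy.2]; exact pvBf_eq_false_of_rank_lt (by decide))]
            rw [pvInsertBy_append_not pvBf "Unclear" _ _ (by
              intro y hy
              simp only [List.mem_filter, beq_iff_eq] at hy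
              rw [hy.2]; exact pvBf_eq_false_of_rank_lt (by decide))]
            rw [pvInsertBy_append_not pvBf "Unclear" _ _ (by
              intro y hy
              simp only [List.mem_filter, beq_iff_eq] at hy
              rw [hy.2]; exact pvBf_eq_false_of_rank_eq (by decide) (lt_irrefl _))]
            rw [pvInsertBy_head_true pvBf "Unclear" _ (by
              intro y hy
              simp only [PySem.List.mem_sorted, List.mem_filter, Bool.not_eq_true'] at hy
              have h7 := pvRank_of_not_special hy.2
              have hrx : pvRank "Unclear" = 6 := by decide
              simp [pvBf, hrx, h7])]
            have e1 : List.filter (fun v => v == "Yes") ["Unclear"] = [] := by decide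
            have e2 : List.filter (fun v => v == "No") ["Unclear"] = [] := by decide
            have e3 : List.filter (fun v => v == "Unclear") ["Unclear"] = ["Unclear"] := by decide
            have e4 : List.filter (fun v => !pvSpecial v) ["Unclear"] = [] := by decide
            simp [e1, e2, e3, e4]
          · -- x is none of the keywords: it is inserted into the sorted `others` bucket
            have h7 : pvRank x = 7 := pvRank_other h1 h2 h3
            have hno : ∀ y : String, pvRank y < 7 → pvBf x y = false := by
              intro y hr
              simp [pvBf, h7, Nat.lt_asymm hr]
              omega
            rw [pvInsertBy_append_not pvBf x _ _ (by
              intro y hy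
              simp only [List.mem_filter, beq_iff_eq] at hy
              exact hno y (by rw [hy.2]; decide))]
            rw [pvInsertBy_append_not pvBf x _ _ (by
              intro y hy
              simp only [List.mem_filter, beq_iff_eq] at hy
              exact hno y (by rw [hy.2]; decide))]
            rw [pvInsertBy_append_not pvBf x _ _ (by
              intro y hy
              simp only [List.mem_filter, beq_iff_eq] at hy
              exact hno y (by rw [hy.2]; decide))]
            rw [pvInsertBy_congr pvBf (fun a b => decide (a < b)) x _ (by
              intro y hy
              simp only [PySem.List.mem_sorted, List.mem_filter, Bool.not_eq_true'] at hy
              have hy7 := pvRank_of_not_special hy.2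
              simp [pvBf, h7, hy7])]
            rw [← pvSorted_snoc]
            have e1 : List.filter (fun v => v == "Yes") [x] = [] := by simp [h1]
            have e2 : List.filter (fun v => v == "No") [x] = [] := by simp [h2]
            have e3 : List.filter (fun v => v == "Unclear") [x] = [] := by simp [h3]
            have e4 : List.filter (fun v => !pvSpecial v) [x] = [x] := by
              simp [pvSpecial, h1, h2, h3]
            simp [e1, e2, e3, e4]

theorem pvJoin_singleton (s : String) : PySem.Str.join ", " [s] = s := by
  simp [PySem.Str.join, PySem.Chars.join_singleton]

-- ===== VERDICT (by name: the statement is the Claim_ definition above) =====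
theorem build_trigger_string_from_values_py_spec : Claim_equal_build_trigger_string_from_values_py := by
  intro rv _
  unfold Spec_build_trigger_string_from_values_py
  unfold build_trigger_string_from_values_py build_trigger_string_from_values_py_alt
  by_cases hnil : rv = []
  · simp [hnil]
  · simp only [if_neg hnil]
    rw [pvBuckets]
    generalize (rv.filter (fun v => v == "Yes") ++ rv.filter (fun v => v == "No")
        ++ rv.filter (fun v => v == "Unclear")
        ++ PySem.List.sorted (rv.filter (fun v => !pvSpecial v)) (fun x => x) false) = M
    match M with
    | [] => simp
    | [a] => simp
    | [a, b] =>
        simp [PySem.List.slice_to_neg_one, pvJoin_singleton]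
        have h2 : PySem.List.pyGetD [a, b] (-1) "" = b := by
          rw [show ([a, b] : List String) = [a] ++ [b] from rfl,
            PySem.List.pyGetD_neg_one_append_singleton]
        have h1 : PySem.List.pyGetD [a, b] (1 : Int) "" = b := by
          rw [show ((1 : Int)) = ((1 : Nat) : Int) from rfl, PySem.List.pyGetD_natCast]
          rfl
        rw [h1, h2]
    | a :: b :: c :: t =>
        have hl : (a :: b :: c :: t).length = t.length + 3 := by simp
        rw [if_neg (by omega), if_neg (by omega), if_neg (by omega)]
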